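-- pv_equiv track=rewrite | github.com/jgddesigns/stateshaper_lesson_backend | src/main/tools/seeds.py | themed_seed_from_word
-- ===== SOURCE A (Python) =====
-- from typing import List
--
-- def themed_seed_from_word(word: str, length: int = 9) -> List[int]:
--     """Map characters of a word to integers (A=1..Z=26) and pad/trim.
--
--     This is useful to create reproducible, human-meaningful seeds like
--     themed_seed_from_word("HISTORICAL").
--     """
--     word = (word or "").upper()
--     base = [max(1, min(26, ord(ch) - 64)) for ch in word if ch.isalpha()]
--     if not base:
--         base = [1]
--
--     # repeat or trim to desired length
--     out = []
--     i = 0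
--     while len(out) < length:
--         out.append(base[i % len(base)])
--         i += 1
--     return out[:length]
-- ===== SOURCE B (Python) =====
-- from typing import List
--
-- def themed_seed_from_word(word: str, length: int = 9) -> List[int]:
--     word = (word or "").upper()
--     base = [max(1, min(26, ord(ch) - 64)) for ch in word if ch.isalpha()]
--     if not base:
--         base = [1]
--     reps = length // len(base) + 1
--     return (base * reps)[:length]
-- ===== Notes on version B (the rewrite author's own statement) =====
-- stated objective: simpler
-- what changed: The element-by-element while-loop that appends base[i % len(base)] until the output is long enough is replaced by a closed-form list replication base * (length // len(base) + 1) sliced to length.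
import Mathlib
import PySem

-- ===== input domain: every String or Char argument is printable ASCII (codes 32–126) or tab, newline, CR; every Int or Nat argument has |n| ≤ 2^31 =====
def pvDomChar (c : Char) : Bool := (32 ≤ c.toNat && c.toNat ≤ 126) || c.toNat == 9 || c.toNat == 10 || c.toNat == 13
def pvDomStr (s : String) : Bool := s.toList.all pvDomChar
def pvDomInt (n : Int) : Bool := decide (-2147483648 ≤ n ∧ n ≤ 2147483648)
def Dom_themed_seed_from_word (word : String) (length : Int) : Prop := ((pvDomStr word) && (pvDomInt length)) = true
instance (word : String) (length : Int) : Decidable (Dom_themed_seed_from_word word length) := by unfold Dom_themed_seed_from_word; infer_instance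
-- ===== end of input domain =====

-- B replaces A's element-by-element modular-index append loop by a closed-form list
-- replication sliced to length (objective: simpler).

-- ===== PORT A =====
-- shared by both ports (identical first lines in both Pythons): upper, clamp letters to 1..26
def themedRaw (word : String) : List Int :=
  ((PySem.Str.upper word).toList.filter PySem.Chars.isalpha).map
    (fun ch => max 1 (min 26 ((ch.toNat : Int) - 64)))

-- 'if not base: base = [1]' (identical in both Pythons)
def themedBase (word : String) : List Int :=
  if themedRaw word = [] then [1] else themedRaw word

-- the while-loop of A: append base[i % len(base)] while len(out) < length (fuel = length.toNat)
def themedLoop (base : List Int) (length : Int) : Nat → Nat → List Int → List Int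
  | 0, _, out => out
  | Nat.succ fuel, i, out =>
    if (out.length : Int) < length then
      themedLoop base length fuel (i + 1) (out ++ [base.getD (i % base.length) 0])
    else out

def themed_seed_from_word (word : String) (length : Int) : List Int :=
  PySem.List.slice (themedLoop (themedBase word) length length.toNat 0 []) none (some length)

-- ===== PORT B =====
def themed_seed_from_word_alt (word : String) (length : Int) : List Int :=
  PySem.List.slice
    (PySem.List.pyRepeat (themedBase word)
      (PySem.Int.floordiv length ((themedBase word).length : Int) + 1))
    none (some length)

-- ===== PRECONDITION & SPEC =====
def Spec_themed_seed_from_word (word : String) (length : Int) (out : List Int) : Prop := out = themed_seed_from_word_alt word length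
instance (word : String) (length : Int) (out : List Int) : Decidable (Spec_themed_seed_from_word word length out) := by unfold Spec_themed_seed_from_word; infer_instance

-- ===== CLAIM (what is proved, stated in full; the proofs are below) =====
def Claim_equal_themed_seed_from_word : Prop := ∀ (word : String) (length : Int), Dom_themed_seed_from_word word length → Spec_themed_seed_from_word word length (themed_seed_from_word word length)

-- ===== LEMMAS AND PROOFS =====

lemma themedBase_ne_nil (word : String) : themedBase word ≠ [] := by
  unfold themedBase
  split
  · simp
  · assumption

-- A's loop, run with exact fuel, is the modular-index map over range fuel
lemma themedLoop_eq (base : List Int) (L : Int) :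
    ∀ (fuel i : Nat) (out : List Int), (out.length : Int) + fuel = L →
    themedLoop base L fuel i out
      = out ++ (List.range fuel).map (fun k => base.getD ((i + k) % base.length) 0) := by
  intro fuel
  induction fuel with
  | zero => intro i out h; simp [themedLoop]
  | succ n ih =>
    intro i out h
    have hlt : (out.length : Int) < L := by push_cast at h ⊢; omega
    rw [themedLoop, if_pos hlt,
      ih (i + 1) (out ++ [base.getD (i % base.length) 0]) (by push_cast at h ⊢; simp; omega)]
    rw [List.range_succ_eq_map]
    simp only [List.map_cons, List.map_map, Function.comp_def, Nat.add_zero,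
      List.append_assoc, List.singleton_append]
    congr 2
    apply List.map_congr_left
    intro k _
    congr 2
    omega

lemma map_getD_range (base : List Int) :
    (List.range base.length).map (fun k => base.getD k 0) = base := by
  apply List.ext_getElem
  · simp
  · intro i h1 h2
    simp [List.getD_eq_getElem?_getD, List.getElem?_eq_getElem h2]

lemma map_getD_mod_range (base : List Int) :
    (List.range base.length).map (fun k => base.getD (k % base.length) 0) = base := by
  conv_rhs => rw [← map_getD_range base]
  apply List.map_congr_left
  intro k hk
  rw [Nat.mod_eq_of_lt (List.mem_range.mp hk)]

lemma flatten_replicate_eq (base : List Int) :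
    ∀ r : Nat, (List.replicate r base).flatten
      = (List.range (r * base.length)).map (fun k => base.getD (k % base.length) 0) := by
  intro r
  induction r with
  | zero => simp
  | succ n ih =>
    have hsplit : (n + 1) * base.length = base.length + n * base.length := by ring
    rw [List.replicate_succ, List.flatten_cons, ih, hsplit, List.range_add,
      List.map_append, List.map_map]
    congr 1
    · exact (map_getD_mod_range base).symm
    · apply List.map_congr_left
      intro k _
      simp [Function.comp, Nat.add_mod_left]

-- ===== VERDICT (by name: the statement is the Claim_ definition above) =====
theorem themed_seed_from_word_spec : Claim_equal_themed_seed_from_word := by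
  intro word length _
  unfold Spec_themed_seed_from_word themed_seed_from_word themed_seed_from_word_alt
  have hne : themedBase word ≠ [] := themedBase_ne_nil word
  set base := themedBase word with hbase
  have hlen : 0 < base.length := List.length_pos_iff.mpr hne
  have hlenI : (0 : Int) < (base.length : Int) := by exact_mod_cast hlen
  rcases le_or_gt 0 length with hL | hL
  · -- 0 ≤ length : both sides are map g (range length.toNat)
    set n := length.toNat with hn
    have hnL : (n : Int) = length := Int.toNat_of_nonneg hL
    -- A side
    rw [themedLoop_eq base length n 0 [] (by simp [hnL])]
    simp only [List.nil_append, Nat.zero_add]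
    have houtlen : ((List.range n).map
        (fun k => base.getD (k % base.length) 0)).length = n := by simp
    rw [PySem.List.slice_to _ hL, ← hn, List.take_of_length_le (le_of_eq houtlen)]
    -- B side
    set r := (PySem.Int.floordiv length (base.length : Int) + 1).toNat with hr
    have hfd : PySem.Int.floordiv length (base.length : Int) = length / (base.length : Int) :=
      PySem.Int.floordiv_eq_ediv_of_pos hlenI
    have hrge : n ≤ r * base.length := by
      have h1 : (base.length : Int) * (length / (base.length : Int))
          + length % (base.length : Int) = length := Int.mul_ediv_add_emod _ _
      have h2 : 0 ≤ length % (base.length : Int) := Int.emod_nonneg _ (by omega)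
      have h3 : length % (base.length : Int) < (base.length : Int) :=
        Int.emod_lt_of_pos _ hlenI
      have h4 : 0 ≤ length / (base.length : Int) := Int.ediv_nonneg hL (by omega)
      have h5 : (r : Int) = length / (base.length : Int) + 1 := by rw [hr, hfd]; omega
      have h6 : (n : Int) ≤ (r : Int) * (base.length : Int) := by
        rw [h5, hnL]; nlinarith
      exact_mod_cast h6
    simp only [PySem.List.pyRepeat]
    rw [← hr, flatten_replicate_eq base r, PySem.List.slice_to _ hL, ← hn,
      ← List.map_take, List.take_range, Nat.min_eq_left hrge]
  · -- length < 0 : both sides are []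
    have hAfuel : length.toNat = 0 := by omega
    have hBr : (PySem.Int.floordiv length (base.length : Int) + 1).toNat = 0 := by
      have hfd : PySem.Int.floordiv length (base.length : Int) = length / (base.length : Int) :=
        PySem.Int.floordiv_eq_ediv_of_pos hlenI
      have hq : length / (base.length : Int) < 0 := by
        by_contra hc
        push Not at hc
        have h1 : (base.length : Int) * (length / (base.length : Int))
            + length % (base.length : Int) = length := Int.mul_ediv_add_emod _ _
        have h2 : 0 ≤ length % (base.length : Int) := Int.emod_nonneg _ (by omega)
        nlinarith
      omega
    simp only [PySem.List.pyRepeat]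
    rw [hAfuel, hBr]
    simp [themedLoop, PySem.List.slice]
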